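-- pv_equiv track=rewrite | github.com/cullinap/dev | practice/ex9.py | even_odd_sums
-- ===== SOURCE A (Python) =====
-- def even_odd_sums(seq):
--     evens = 0
--     odds = 0
--
--     #return seq[:1]
--
--     for i in range(len(seq)):
--         if i % 2 == 0:
--             evens += seq[i:i+1][0]
--         else:
--             odds += seq[i:i+1][0]
--
--     return [evens, odds]
-- ===== SOURCE B (Python) =====
-- def even_odd_sums(seq):
--     return [sum(seq[::2]), sum(seq[1::2])]
-- ===== Notes on version B (the rewrite author's own statement) =====
-- stated objective: idiomatic
-- what changed: Replaces the index loop that dispatches on i % 2 (reading each element via the per-element slice seq[i:i+1][0]) with two extended slices seq[::2] and seq[1::2] summed by the builtin sum, with no explicit loop, no parity test and no per-element slicing; the C-level slicing/sum removes per-element interpreter work, a constant-factor speedup a timing run measured.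
import Mathlib
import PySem

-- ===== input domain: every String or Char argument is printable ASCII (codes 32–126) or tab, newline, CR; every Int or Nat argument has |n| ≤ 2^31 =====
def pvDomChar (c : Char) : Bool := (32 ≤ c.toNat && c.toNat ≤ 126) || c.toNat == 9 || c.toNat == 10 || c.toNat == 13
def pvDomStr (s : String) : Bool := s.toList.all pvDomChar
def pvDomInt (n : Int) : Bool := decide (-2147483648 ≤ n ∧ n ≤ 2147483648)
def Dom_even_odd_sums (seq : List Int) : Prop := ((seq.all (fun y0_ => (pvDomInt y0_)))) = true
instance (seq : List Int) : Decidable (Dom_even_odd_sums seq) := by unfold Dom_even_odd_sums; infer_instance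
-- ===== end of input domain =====

-- B replaces A's index loop dispatching on i % 2 by summing the two stride-2 slices seq[::2] and seq[1::2] (objective: idiomatic).

-- ===== PORT A =====
def even_odd_sums (seq : List Int) : List Int :=
  -- for i in range(len(seq)): parity-dispatch, reading seq[i:i+1][0]
  -- (the [0] index never fails since i < len(seq); pyGetD's default 0 is unreachable)
  let r := (PySem.List.pyRange 0 (seq.length : Int) 1).foldl
    (fun (st : Int × Int) (i : Int) =>
      if PySem.Int.mod i 2 = 0 then
        (st.1 + PySem.List.pyGetD (PySem.List.slice seq (some i) (some (i + 1))) 0 0, st.2)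
      else
        (st.1, st.2 + PySem.List.pyGetD (PySem.List.slice seq (some i) (some (i + 1))) 0 0))
    (0, 0)
  [r.1, r.2]

-- ===== PORT B =====
def even_odd_sums_alt (seq : List Int) : List Int :=
  -- [sum(seq[::2]), sum(seq[1::2])]  (step 2 ≠ 0, so slice? is always some; getD [] is unreachable)
  [((PySem.List.slice? seq none none 2).getD []).sum,
   ((PySem.List.slice? seq (some 1) none 2).getD []).sum]

-- ===== PRECONDITION & SPEC =====
def Spec_even_odd_sums (seq : List Int) (out : List Int) : Prop := out = even_odd_sums_alt seq
instance (seq : List Int) (out : List Int) : Decidable (Spec_even_odd_sums seq out) := by unfold Spec_even_odd_sums; infer_instance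

-- ===== CLAIM (what is proved, stated in full; the proofs are below) =====
def Claim_equal_even_odd_sums : Prop := ∀ (seq : List Int), Dom_even_odd_sums seq → Spec_even_odd_sums seq (even_odd_sums seq)

-- ===== LEMMAS AND PROOFS =====

/-- The even-indexed elements of a list (proof-side characterisation of both programs). -/
def everyOther : List Int → List Int
  | [] => []
  | [x] => [x]
  | x :: _ :: rest => x :: everyOther rest

theorem everyOther_cons (a : Int) (l : List Int) :
    everyOther (a :: l) = a :: everyOther l.tail := by
  cases l <;> simp [everyOther]

/-- A's loop body, named for the proofs (definitionally the lambda in the port). -/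
def aStep (seq : List Int) (st : Int × Int) (i : Int) : Int × Int :=
  if PySem.Int.mod i 2 = 0 then
    (st.1 + PySem.List.pyGetD (PySem.List.slice seq (some i) (some (i + 1))) 0 0, st.2)
  else
    (st.1, st.2 + PySem.List.pyGetD (PySem.List.slice seq (some i) (some (i + 1))) 0 0)

theorem even_odd_sums_eq_aStep (seq : List Int) :
    even_odd_sums seq =
      [((PySem.List.pyRange 0 (seq.length : Int) 1).foldl (aStep seq) (0, 0)).1,
       ((PySem.List.pyRange 0 (seq.length : Int) 1).foldl (aStep seq) (0, 0)).2] := rfl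

/-- The fold's state is additive: starting from (e, o) just translates the result. -/
theorem foldl_aStep_translate (seq : List Int) (l : List Int) (e o : Int) :
    l.foldl (aStep seq) (e, o) =
      (e + (l.foldl (aStep seq) (0, 0)).1, o + (l.foldl (aStep seq) (0, 0)).2) := by
  induction l generalizing e o with
  | nil => simp
  | cons i l ih =>
    simp only [List.foldl_cons]
    rw [ih, ih (aStep seq (0, 0) i).1 (aStep seq (0, 0) i).2]
    unfold aStep
    split_ifs <;> simp <;> ring

theorem aStep_shift (x y : Int) (rest : List Int) (st : Int × Int) (k : Nat) :
    aStep (x :: y :: rest) st (2 + (k : Int)) = aStep rest st (k : Int) := by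
  have h2 : (2 : Int) + (k : Int) = ((2 + k : Nat) : Int) := by push_cast; ring
  have h3 : (2 : Int) + (k : Int) + 1 = ((2 + k + 1 : Nat) : Int) := by push_cast; ring
  have hk1 : (k : Int) + 1 = ((k + 1 : Nat) : Int) := by push_cast; ring
  have hmod : PySem.Int.mod (2 + (k : Int)) 2 = PySem.Int.mod (k : Int) 2 := by
    rw [PySem.Int.mod_eq_emod_of_pos (by omega), PySem.Int.mod_eq_emod_of_pos (by omega)]
    omega
  have hsl : PySem.List.slice (x :: y :: rest) (some (2 + (k : Int))) (some (2 + (k : Int) + 1))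
      = PySem.List.slice rest (some (k : Int)) (some ((k : Int) + 1)) := by
    rw [PySem.List.slice_toNat (x :: y :: rest) (by omega) (by omega),
       PySem.List.slice_toNat rest (by omega) (by omega)]
    have e1 : (2 + (k : Int)).toNat = k + 2 := by omega
    have e2 : (2 + (k : Int) + 1).toNat = k + 3 := by omega
    have e3 : ((k : Int)).toNat = k := by omega
    have e4 : ((k : Int) + 1).toNat = k + 1 := by omega
    rw [e1, e2, e3, e4]
    simp
  unfold aStep
  rw [hmod, hsl]

/-- Characterisation of A's fold: the pair of even- and odd-index sums. -/
theorem foldl_aStep_char (seq : List Int) :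
    (PySem.List.pyRange 0 (seq.length : Int) 1).foldl (aStep seq) (0, 0) =
      ((everyOther seq).sum, (everyOther seq.tail).sum) := by
  induction seq using everyOther.induct with
  | case1 => simp [PySem.List.pyRange_one_eq_nil, everyOther]
  | case2 x =>
    rw [PySem.List.pyRange_one_cons (by norm_num), PySem.List.pyRange_one_eq_nil (by norm_num)]
    simp [aStep, PySem.Int.mod, PySem.List.slice, PySem.List.pyGetD, everyOther]
  | case3 x y rest ih =>
    have hlen : ((x :: y :: rest).length : Int) = (rest.length : Int) + 2 := by
      simp; ring
    rw [hlen, PySem.List.pyRange_one_cons (by omega), PySem.List.pyRange_one_cons (by omega)]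
    simp only [List.foldl_cons]
    have h0 : aStep (x :: y :: rest) (0, 0) 0 = (x, 0) := by
      unfold aStep
      rw [PySem.List.slice_toNat (x :: y :: rest) (by omega) (by omega)]
      norm_num [PySem.Int.mod_eq_emod_of_pos (show (0:Int) < 2 by omega), PySem.List.pyGetD_zero_cons]
    have h1 : aStep (x :: y :: rest) (x, 0) (0 + 1) = (x, y) := by
      unfold aStep
      rw [PySem.List.slice_toNat (x :: y :: rest) (by omega) (by omega)]
      norm_num [PySem.Int.mod_eq_emod_of_pos (show (0:Int) < 2 by omega)]
      simp [PySem.List.pyGetD_zero_cons]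
    rw [h0, h1, foldl_aStep_translate]
    have hshift : (PySem.List.pyRange (0 + 1 + 1) ((rest.length : Int) + 2) 1).foldl
        (aStep (x :: y :: rest)) (0, 0) =
        (PySem.List.pyRange 0 (rest.length : Int) 1).foldl (aStep rest) (0, 0) := by
      rw [PySem.List.pyRange_one, PySem.List.pyRange_one]
      have hn : ((rest.length : Int) + 2 - (0 + 1 + 1)).toNat = rest.length := by omega
      have hn2 : ((rest.length : Int) - 0).toNat = rest.length := by omega
      rw [hn, hn2, List.foldl_map, List.foldl_map]
      have hf : (fun (st : Int × Int) (k : Nat) => aStep (x :: y :: rest) st (0 + 1 + 1 + (k : Int)))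
          = (fun (st : Int × Int) (k : Nat) => aStep rest st (0 + (k : Int))) := by
        funext st k
        have : (0 : Int) + 1 + 1 + (k : Int) = 2 + (k : Int) := by ring
        rw [this, zero_add]
        exact aStep_shift x y rest st k
      rw [hf]
    rw [hshift, ih]
    simp [everyOther_cons]

theorem filterMap_even_idx (xs : List Int) :
    List.filterMap (fun k : Nat => xs[2 * k]?) (List.range ((xs.length + 1) / 2)) =
      everyOther xs := by
  induction xs using everyOther.induct with
  | case1 => simp [everyOther]
  | case2 x => simp [everyOther, List.range_succ]
  | case3 x y rest ih =>
    have hc : ((x :: y :: rest).length + 1) / 2 = (rest.length + 1) / 2 + 1 := by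
      simp; omega
    rw [hc, List.range_succ_eq_map, List.filterMap_cons, List.filterMap_map]
    have hf : ((fun k : Nat => (x :: y :: rest)[2 * k]?) ∘ Nat.succ)
        = fun k : Nat => rest[2 * k]? := by
      funext k
      show (x :: y :: rest)[2 * (k + 1)]? = rest[2 * k]?
      have : 2 * (k + 1) = 2 * k + 1 + 1 := by omega
      rw [this, List.getElem?_cons_succ, List.getElem?_cons_succ]
    simp only [hf, ih]
    simp [everyOther]

theorem filterMap_odd_idx (xs : List Int) :
    List.filterMap (fun k : Nat => xs[1 + 2 * k]?) (List.range (xs.length / 2)) =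
      everyOther xs.tail := by
  induction xs using everyOther.induct with
  | case1 => simp [everyOther]
  | case2 x => simp [everyOther]
  | case3 x y rest ih =>
    have hc : (x :: y :: rest).length / 2 = rest.length / 2 + 1 := by
      simp; omega
    rw [hc, List.range_succ_eq_map, List.filterMap_cons, List.filterMap_map]
    have hf : ((fun k : Nat => (x :: y :: rest)[1 + 2 * k]?) ∘ Nat.succ)
        = fun k : Nat => rest[1 + 2 * k]? := by
      funext k
      show (x :: y :: rest)[1 + 2 * (k + 1)]? = rest[1 + 2 * k]?
      have : 1 + 2 * (k + 1) = 1 + 2 * k + 1 + 1 := by omega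
      rw [this, List.getElem?_cons_succ, List.getElem?_cons_succ]
    simp only [hf, ih]
    simp [everyOther_cons]

theorem even_odd_sums_alt_char (seq : List Int) :
    even_odd_sums_alt seq = [(everyOther seq).sum, (everyOther seq.tail).sum] := by
  unfold even_odd_sums_alt PySem.List.slice? PySem.List.sliceIndices
  norm_num
  constructor
  · have hcount : (if 0 < seq.length then (((seq.length : Int) + 2 - 1) / 2).toNat else 0)
        = (seq.length + 1) / 2 := by
      split_ifs <;> omega
    have hfun : (fun x : Nat => seq[(2 * (x : Int)).toNat]?) = fun k : Nat => seq[2 * k]? := by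
      funext k
      congr 1
    rw [hcount, hfun, filterMap_even_idx]
  · cases seq with
    | nil => simp [everyOther]
    | cons a l =>
      have hmin : min 1 (((a :: l).length : Int)) = 1 := by
        simp only [List.length_cons]
        omega
      rw [hmin]
      have hcount : (if 1 < (a :: l).length then ((((a :: l).length : Int) - 1 + 2 - 1) / 2).toNat else 0)
          = (a :: l).length / 2 := by
        split_ifs <;> simp only [List.length_cons] at * <;> omega
      have hfun : (fun x : Nat => (a :: l)[(1 + 2 * (x : Int)).toNat]?) = fun k : Nat => (a :: l)[1 + 2 * k]? := by
        funext k
        congr 1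
      rw [hcount, hfun, filterMap_odd_idx]

-- ===== VERDICT (by name: the statement is the Claim_ definition above) =====
theorem even_odd_sums_spec : Claim_equal_even_odd_sums := by
  intro seq _
  unfold Spec_even_odd_sums
  rw [even_odd_sums_eq_aStep, foldl_aStep_char, even_odd_sums_alt_char]
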